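-- pv_equiv track=rewrite | github.com/brendanhasz/pipedown | src/pipedown/visualization/dag_viewer.py | to_md
-- ===== SOURCE A (Python) =====
-- def to_md(doc):
--     """Convert Parameter-like sections to markdown"""
--     # TODO: blech there's gotta be a better way to do this w/ regex + nested
--     # groups, but regex is gross and I'm lazy
--     new_doc = ""
--     for section in doc.split("\n\n"):
--
--         lines = section.split("\n")
--
--         if (  # this section is a parameter section
--             len(lines) > 3
--             and len(set(lines[1])) == 1
--             and list(set(lines[1]))[0] == "-"
--         ):
--
--             new_doc += lines[0] + "\n" + lines[1] + "\n"
--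
--             for line in lines[2:]:
--                 if line[0] != " ":  # new parameter
--                     if ":" in line:  # has a dtype
--                         param, dtype = line.split(" : ")
--                         new_doc += f"\n* **{param}** (*{dtype}*) "
--                     else:  # no dtype
--                         new_doc += f"\n* **{line}** "
--                 else:  # continued description of previous parameter
--                     new_doc += f"{line.strip()} "
--
--         else:  # not a parameters section
--             new_doc += section + "\n\n"
--
--     return new_doc
-- ===== SOURCE B (Python) =====
-- def to_md(doc):
--     """Convert Parameter-like sections to markdown"""
--     out = []
--     for section in doc.split("\n\n"):
--         lines = section.split("\n")
--         if (  # this section is a parameter section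
--             len(lines) > 3
--             and len(set(lines[1])) == 1
--             and list(set(lines[1]))[0] == "-"
--         ):
--             out.append(lines[0] + "\n" + lines[1] + "\n")
--             # pass 1: group lines[2:] into parameter records
--             records = []  # (param or None, dtype or None, fragment list)
--             for line in lines[2:]:
--                 if line[0] != " ":  # new parameter
--                     if ":" in line:
--                         param, dtype = line.split(" : ")
--                         records.append((param, dtype, []))
--                     else:
--                         records.append((line, None, []))
--                 else:  # continuation fragment
--                     if not records:
--                         records.append((None, None, []))
--                     records[-1][2].append(line.strip())
--             # pass 2: render the records
--             for param, dtype, frags in records: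
--                 if param is not None:
--                     if dtype is not None:
--                         out.append(f"\n* **{param}** (*{dtype}*) ")
--                     else:
--                         out.append(f"\n* **{param}** ")
--                 out.append("".join(f + " " for f in frags))
--         else:
--             out.append(section + "\n\n")
--     return "".join(out)
-- ===== Notes on version B (the rewrite author's own statement) =====
-- stated objective: alternative
-- what changed: B replaces A's single pass that appends markdown to one growing string with a two-phase decomposition: a first pass groups each parameter section's lines into records (param, optional dtype, list of stripped continuation fragments), a second pass renders the records, and all output pieces are collected in a list joined once at the end.
import Mathlib
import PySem

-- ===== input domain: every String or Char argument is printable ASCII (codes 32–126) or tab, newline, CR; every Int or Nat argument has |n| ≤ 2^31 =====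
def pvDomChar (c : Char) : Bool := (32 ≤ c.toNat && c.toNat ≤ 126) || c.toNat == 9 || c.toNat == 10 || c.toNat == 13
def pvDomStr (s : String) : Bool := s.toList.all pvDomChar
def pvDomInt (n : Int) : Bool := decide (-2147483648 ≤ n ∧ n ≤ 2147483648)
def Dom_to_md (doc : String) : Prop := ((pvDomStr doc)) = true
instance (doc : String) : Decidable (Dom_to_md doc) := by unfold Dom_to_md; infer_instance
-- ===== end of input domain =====

-- B re-groups each parameter section into records (param, dtype?, fragments) in a first
-- pass and renders them in a second pass, collecting pieces joined once at the end,
-- instead of A's single pass appending to one growing string (objective: alternative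
-- decomposition, same cost).

-- ===== PORT A =====

-- Shared by both ports (and by Pre_): the test
-- 'len(lines) > 3 and len(set(lines[1])) == 1 and list(set(lines[1]))[0] == "-"'.
-- (lines[1] is only read under the length guard, hence the harmless default [].)
def isParamSec (lines : List (List Char)) : Bool :=
  decide (lines.length > 3) &&
    (decide ((PySem.Set.ofList (PySem.List.pyGetD lines 1 []) : List Char).length = 1) &&
      decide (PySem.List.pyGetD (PySem.Set.ofList (PySem.List.pyGetD lines 1 []) : List Char) 0 ' ' = '-'))

-- one line of lines[2:]; none = the IndexError of line[0] on an empty line, or the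
-- ValueError of 'param, dtype = line.split(" : ")' when the split is not 2 pieces
def aLine (acc : List Char) (line : List Char) : Option (List Char) :=
  match PySem.List.pyGet? line 0 with
  | none => none
  | some c =>
    if c ≠ ' ' then
      if PySem.Chars.isIn [':'] line then
        match PySem.Chars.splitOn line [' ', ':', ' '] with
        | [param, dtype] =>
            some (acc ++ "\n* **".toList ++ param ++ "** (*".toList ++ dtype ++ "*) ".toList)
        | _ => none
      else some (acc ++ "\n* **".toList ++ line ++ "** ".toList)
    else some (acc ++ PySem.Chars.strip line ++ [' '])

-- one section of doc.split("\n\n")  (lines[2:] is List.drop 2: exact for this nonnegative slice)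
def aSection (acc : List Char) (sec : List Char) : Option (List Char) :=
  let lines := PySem.Chars.splitOn sec ['\n']
  if isParamSec lines then
    (lines.drop 2).foldlM aLine
      (acc ++ PySem.List.pyGetD lines 0 [] ++ ['\n'] ++ PySem.List.pyGetD lines 1 [] ++ ['\n'])
  else some (acc ++ sec ++ ['\n', '\n'])

-- outside Pre_ the Python raises (the fold is none); .getD [] is never reached there
def to_md (doc : String) : String :=
  String.mk (((PySem.Chars.splitOn doc.toList ['\n', '\n']).foldlM aSection []).getD [])

-- ===== PORT B =====

-- a parameter record: (param or None, dtype or None, stripped continuation fragments)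
abbrev PRec := Option (List Char) × Option (List Char) × List (List Char)

-- pass 1: group one line into the record list (same raising cases as the Python B)
def bParse (recs : List PRec) (line : List Char) : Option (List PRec) :=
  match PySem.List.pyGet? line 0 with
  | none => none
  | some c =>
    if c ≠ ' ' then
      if PySem.Chars.isIn [':'] line then
        match PySem.Chars.splitOn line [' ', ':', ' '] with
        | [param, dtype] => some (recs ++ [(some param, some dtype, [])])
        | _ => none
      else some (recs ++ [(some line, none, [])])
    else
      -- 'if not records: records.append((None, None, []))' then 'records[-1][2].append(...)'
      let recs' := if recs.isEmpty then
          recs ++ [((none : Option (List Char)), (none : Option (List Char)), ([] : List (List Char)))]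
        else recs
      let r := recs'.getLastD (none, none, [])
      some (recs'.dropLast ++ [(r.1, r.2.1, r.2.2 ++ [PySem.Chars.strip line])])

-- pass 2: render one record, appending its pieces to the out list
-- ('"".join(f + " " for f in frags)' is the concatenation of the fragments each + " ")
def bRender (out : List (List Char)) (r : PRec) : List (List Char) :=
  let out' := match r.1 with
    | some param =>
      match r.2.1 with
      | some dtype => out ++ ["\n* **".toList ++ param ++ "** (*".toList ++ dtype ++ "*) ".toList]
      | none => out ++ ["\n* **".toList ++ param ++ "** ".toList]
    | none => out
  out' ++ [r.2.2.flatMap (fun f => f ++ [' '])]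

def bSection (out : List (List Char)) (sec : List Char) : Option (List (List Char)) :=
  let lines := PySem.Chars.splitOn sec ['\n']
  if isParamSec lines then
    ((lines.drop 2).foldlM bParse ([] : List PRec)).map (fun recs =>
      recs.foldl bRender
        (out ++ [PySem.List.pyGetD lines 0 [] ++ ['\n'] ++ PySem.List.pyGetD lines 1 [] ++ ['\n']]))
  else some (out ++ [sec ++ ['\n', '\n']])

def to_md_alt (doc : String) : String :=
  String.mk (PySem.Chars.join []
    (((PySem.Chars.splitOn doc.toList ['\n', '\n']).foldlM bSection []).getD []))

-- ===== PRECONDITION & SPEC =====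

-- Pre_ excludes exactly the inputs on which the Python A raises: a parameter section
-- containing an empty line (IndexError on line[0]) or a non-indented line that contains
-- a colon but whose space-colon-space split is not exactly two pieces (ValueError).
def Pre_to_md (doc : String) : Prop :=
  ∀ sec ∈ PySem.Chars.splitOn doc.toList ['\n', '\n'],
    isParamSec (PySem.Chars.splitOn sec ['\n']) = true →
    ∀ line ∈ (PySem.Chars.splitOn sec ['\n']).drop 2,
      line ≠ [] ∧
        (line.head? ≠ some ' ' →
          PySem.Chars.isIn [':'] line = true →
          (PySem.Chars.splitOn line [' ', ':', ' ']).length = 2)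

instance (doc : String) : Decidable (Pre_to_md doc) := by unfold Pre_to_md; infer_instance

def pvWitness_to_md : String := "t\n-\na\nb"

def Spec_to_md (doc : String) (out : String) : Prop := out = to_md_alt doc
instance (doc : String) (out : String) : Decidable (Spec_to_md doc out) := by unfold Spec_to_md; infer_instance

-- ===== CLAIM (what is proved, stated in full; the proofs are below) =====
def Claim_equal_to_md : Prop := ∀ (doc : String), Dom_to_md doc → Pre_to_md doc → Spec_to_md doc (to_md doc)

-- ===== LEMMAS AND PROOFS =====

-- the pieces bRender appends for one record
def pieces (r : PRec) : List (List Char) :=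
  (match r.1 with
   | some param =>
     match r.2.1 with
     | some dtype => ["\n* **".toList ++ param ++ "** (*".toList ++ dtype ++ "*) ".toList]
     | none => ["\n* **".toList ++ param ++ "** ".toList]
   | none => []) ++ [r.2.2.flatMap (fun f => f ++ [' '])]

theorem bRender_eq (out : List (List Char)) (r : PRec) : bRender out r = out ++ pieces r := by
  obtain ⟨p, d, fs⟩ := r
  cases p <;> cases d <;> simp [bRender, pieces]

theorem foldl_bRender_eq (recs : List PRec) (out : List (List Char)) :
    recs.foldl bRender out = out ++ recs.flatMap pieces := by
  rw [PySem.List.foldl_congr_mem recs bRender (fun acc r => acc ++ pieces r) out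
      (fun acc r _ => bRender_eq acc r)]
  exact PySem.List.foldl_append_eq_flatMap pieces recs out

theorem pieces_snoc_frag (p : Option (List Char)) (d : Option (List Char))
    (fs : List (List Char)) (x : List Char) :
    (pieces (p, d, fs ++ [x])).flatten = (pieces (p, d, fs)).flatten ++ x ++ [' '] := by
  cases p <;> cases d <;> simp [pieces]

theorem join_nil_eq_flatten (xs : List (List Char)) : PySem.Chars.join [] xs = xs.flatten := by
  induction xs with
  | nil => rfl
  | cons h t ih =>
    simp [PySem.Chars.join, List.intercalate] at *
    induction t with
    | nil => simp
    | cons a b ihh => simp_all [List.intersperse]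

-- inner loop: A's per-line fold over the tail of a parameter section computes exactly
-- the base text plus the rendering of B's record list (and is none exactly together)
theorem inner_eq (ls : List (List Char)) : ∀ (recs : List PRec) (base : List Char),
    ls.foldlM aLine (base ++ (recs.flatMap pieces).flatten) =
      (ls.foldlM bParse recs).map (fun r => base ++ (r.flatMap pieces).flatten) := by
  induction ls with
  | nil => intro recs base; simp [List.foldlM]
  | cons line rest ih =>
    intro recs base
    simp only [List.foldlM]
    cases hg : PySem.List.pyGet? line 0 with
    | none => simp [aLine, bParse, hg]
    | some c =>
      by_cases hc : c = ' '
      · -- continuation line: strip + " " is appended at the very end of the text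
        subst hc
        simp only [aLine, bParse, hg, if_neg (show ¬(' ' ≠ ' ') by decide)]
        by_cases he : recs.isEmpty
        · have hnil : recs = [] := List.isEmpty_iff.mp he
          subst hnil
          have := ih [((none : Option (List Char)), (none : Option (List Char)),
            ([PySem.Chars.strip line] : List (List Char)))] base
          simpa [pieces, Option.bind_some] using this
        · have hne : recs ≠ [] := by simpa [List.isEmpty_iff] using he
          rw [if_neg he]
          have hlast : recs.getLastD ((none : Option (List Char)), (none : Option (List Char)),
              ([] : List (List Char))) = recs.getLast hne := by
            rw [List.getLastD_eq_getLast?, List.getLast?_eq_some_getLast hne, Option.getD_some]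
          rw [hlast]
          have key : ((recs.dropLast ++ [((recs.getLast hne).1, (recs.getLast hne).2.1,
                (recs.getLast hne).2.2 ++ [PySem.Chars.strip line])]).flatMap pieces).flatten
              = (recs.flatMap pieces).flatten ++ (PySem.Chars.strip line ++ [' ']) := by
            conv_rhs => rw [← List.dropLast_concat_getLast hne]
            obtain ⟨p, d, fs⟩ := recs.getLast hne
            simp [List.flatMap_append, pieces_snoc_frag]
          have := ih (recs.dropLast ++ [((recs.getLast hne).1, (recs.getLast hne).2.1,
            (recs.getLast hne).2.2 ++ [PySem.Chars.strip line])]) base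
          rw [key] at this
          simpa [Option.bind_some, List.append_assoc] using this
      · -- new parameter line
        simp only [aLine, bParse, hg, if_pos hc]
        cases hin : PySem.Chars.isIn [':'] line with
        | true =>
          cases hsp : PySem.Chars.splitOn line [' ', ':', ' '] with
          | nil => simp
          | cons a tl =>
            cases tl with
            | nil => simp
            | cons b tl2 =>
              cases tl2 with
              | nil =>
                have := ih (recs ++ [((some a : Option (List Char)), (some b : Option (List Char)),
                  ([] : List (List Char)))]) base
                simpa [Option.bind_some, List.flatMap_append, pieces, List.append_assoc] using this
              | cons _ _ => simp
        | false =>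
          have := ih (recs ++ [((some line : Option (List Char)), (none : Option (List Char)),
            ([] : List (List Char)))]) base
          simpa [Option.bind_some, List.flatMap_append, pieces, List.append_assoc] using this

-- one section: A's accumulator is always the flattening of B's out-list
theorem section_step (out : List (List Char)) (sec : List Char) :
    aSection out.flatten sec = (bSection out sec).map List.flatten := by
  simp only [aSection, bSection]
  by_cases h : isParamSec (PySem.Chars.splitOn sec ['\n']) = true
  · simp only [h, if_true]
    have := inner_eq ((PySem.Chars.splitOn sec ['\n']).drop 2) []
      (out.flatten ++ PySem.List.pyGetD (PySem.Chars.splitOn sec ['\n']) 0 [] ++ ['\n'] ++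
        PySem.List.pyGetD (PySem.Chars.splitOn sec ['\n']) 1 [] ++ ['\n'])
    simp only [List.flatMap_nil, List.flatten_nil, List.append_nil] at this
    rw [this]
    cases hb : ((PySem.Chars.splitOn sec ['\n']).drop 2).foldlM bParse ([] : List PRec) with
    | none => simp
    | some recs => simp [foldl_bRender_eq, List.append_assoc]
  · simp [h]

theorem outer_eq (secs : List (List Char)) : ∀ (out : List (List Char)),
    secs.foldlM aSection out.flatten = (secs.foldlM bSection out).map List.flatten := by
  induction secs with
  | nil => intro out; simp [List.foldlM]
  | cons sec rest ih =>
    intro out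
    simp only [List.foldlM]
    rw [section_step]
    cases hb : bSection out sec with
    | none => simp
    | some out' => simpa using ih out'

-- ===== VERDICT (by name: the statement is the Claim_ definition above) =====
theorem to_md_spec : Claim_equal_to_md := by
  intro doc _ _
  unfold Spec_to_md to_md to_md_alt
  rw [join_nil_eq_flatten]
  have h := outer_eq (PySem.Chars.splitOn doc.toList ['\n', '\n']) []
  simp only [List.flatten_nil] at h
  rw [h]
  cases hb : (PySem.Chars.splitOn doc.toList ['\n', '\n']).foldlM bSection ([] : List (List Char)) with
  | none => simp
  | some out => simp
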